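-- pv_equiv track=rewrite | github.com/wangjingshen/script | probe_primer/script/probe.py | findall_mismatch
-- ===== SOURCE A (Python) =====
-- from itertools import combinations, product
--
-- def findall_mismatch(seq, n_mismatch=1, bases='ACGTN'):
--     """
--     choose locations where there's going to be a mismatch using combinations
--     and then construct all satisfying lists using product
--
--     Return:
--     all mismatch <= n_mismatch set.
--
--     >>> answer = set(["TCG", "AAG", "ACC", "ATG", "ACT", "ACN", "GCG", "ANG", "ACA", "ACG", "CCG", "AGG", "NCG"])
--     >>> seq_set = findall_mismatch("ACG")
--     >>> seq_set == answer
--     True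
--     """
--     seq_set = set()
--     seq_len = len(seq)
--     if n_mismatch > seq_len:
--         n_mismatch = seq_len
--     for locs in combinations(range(seq_len), n_mismatch):
--         seq_locs = [[base] for base in seq]
--         for loc in locs:
--             seq_locs[loc] = list(bases)
--         for poss in product(*seq_locs):
--             seq_set.add(''.join(poss))
--     return seq_set
-- ===== SOURCE B (Python) =====
-- from itertools import combinations, product
--
-- def findall_mismatch(seq, n_mismatch=1, bases='ACGTN'):
--     """Duplicate-free enumeration: emit each candidate string exactly once, at
--     the lexicographically smallest location-combination able to produce it,
--     instead of generating all C(L,k)*B^k strings and deduplicating in a set."""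
--     L = len(seq)
--     k = min(n_mismatch, L)
--     ub = list(dict.fromkeys(bases))      # distinct bases, first occurrences
--     bset = set(ub)
--     result = set()
--     for locs in combinations(range(L), k):
--         locset = set(locs)
--         # first position outside locs usable by an earlier combination
--         g = L
--         for j in range(L):
--             if j not in locset and seq[j] in bset:
--                 g = j
--                 break
--         choices = []
--         for i in range(L):
--             if i not in locset:
--                 choices.append((seq[i],))
--             elif i < g:
--                 choices.append(ub)       # free position: any distinct base
--             else:
--                 choices.append([b for b in ub if b != seq[i]])  # must mismatch
--         for poss in product(*choices):
--             result.add(''.join(poss))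
--     return result
-- ===== Notes on version B (the rewrite author's own statement) =====
-- stated objective: alternative
-- what changed: B enumerates each candidate exactly once (free choices only before the first reusable position outside the chosen locations, strictly mismatching deduplicated bases after it), so every add is fresh, instead of A's generate-everything-and-deduplicate-in-a-set which rebuilds each string up to C(L,k) times.
import Mathlib
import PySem

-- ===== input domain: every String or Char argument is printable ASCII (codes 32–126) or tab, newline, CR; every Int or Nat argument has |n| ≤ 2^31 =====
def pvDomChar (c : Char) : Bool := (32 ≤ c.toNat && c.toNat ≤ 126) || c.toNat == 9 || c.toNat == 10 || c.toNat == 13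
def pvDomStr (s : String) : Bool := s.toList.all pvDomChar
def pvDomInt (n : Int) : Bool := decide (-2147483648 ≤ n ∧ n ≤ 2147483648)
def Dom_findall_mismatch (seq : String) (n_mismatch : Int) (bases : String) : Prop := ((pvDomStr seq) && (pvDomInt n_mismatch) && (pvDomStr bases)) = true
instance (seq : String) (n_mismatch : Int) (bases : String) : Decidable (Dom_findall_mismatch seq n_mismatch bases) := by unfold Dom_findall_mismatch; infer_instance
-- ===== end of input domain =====

-- B enumerates each candidate exactly once (mismatch-only choices past the first reusable
-- position) instead of A's generate-everything-and-deduplicate-in-a-set; equal output set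
-- in the same insertion order.

-- ===== PORT A =====
-- itertools.combinations(l, r) in lexicographic order (both Pythons call it)
def pvCombs : Nat → List Nat → List (List Nat)
  | 0, _ => [[]]
  | _ + 1, [] => []
  | k + 1, x :: xs => (pvCombs k xs).map (fun c => x :: c) ++ pvCombs (k + 1) xs

-- itertools.product(*lists), last coordinate varying fastest (both Pythons call it)
def pvProd : List (List Char) → List (List Char)
  | [] => [[]]
  | l :: ls => l.flatMap (fun c => (pvProd ls).map (fun p => c :: p))

def findall_mismatch (seq : String) (n_mismatch : Int) (bases : String) : List String :=
  let t := seq.toList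
  let seq_len := t.length
  let n' : Int := if n_mismatch > (seq_len : Int) then (seq_len : Int) else n_mismatch
  (pvCombs n'.toNat (List.range seq_len)).foldl
    (fun seq_set locs =>
      let seq_locs := locs.foldl (fun sl loc => sl.set loc bases.toList) (t.map (fun c => [c]))
      (pvProd seq_locs).foldl (fun s p => PySem.Set.add s (String.ofList p)) seq_set)
    []

-- ===== PORT B =====
-- 'for j in range(L): if p(j): g = j; break' with default d
def pvFirst (p : Nat → Bool) : List Nat → Nat → Nat
  | [], d => d
  | j :: js, d => if p j then j else pvFirst p js d

def findall_mismatch_alt (seq : String) (n_mismatch : Int) (bases : String) : List String :=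
  let t := seq.toList
  let L := t.length
  let k := (min n_mismatch (L : Int)).toNat
  let ub : PySem.Set Char := PySem.Set.ofList bases.toList
  (pvCombs k (List.range L)).foldl
    (fun result locs =>
      let g := pvFirst (fun j => !locs.contains j && PySem.Set.contains ub (t.getD j ' ')) (List.range L) L
      let choices := (List.range L).map (fun i =>
        if !locs.contains i then [t.getD i ' ']
        else if i < g then ub
        else ub.filter (fun b => b ≠ t.getD i ' '))
      (pvProd choices).foldl (fun s p => PySem.Set.add s (String.ofList p)) result)
    []

-- ===== PRECONDITION & SPEC =====
-- Pre_ excludes exactly n_mismatch < 0, where A raises ValueError (combinations' r must be non-negative).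
def Pre_findall_mismatch (seq : String) (n_mismatch : Int) (bases : String) : Prop :=
  0 ≤ n_mismatch
instance (seq : String) (n_mismatch : Int) (bases : String) : Decidable (Pre_findall_mismatch seq n_mismatch bases) := by unfold Pre_findall_mismatch; infer_instance

def pvWitness_findall_mismatch : String × Int × String := ("ACG", 1, "ACGTN")

def Spec_findall_mismatch (seq : String) (n_mismatch : Int) (bases : String) (out : List String) : Prop := out = findall_mismatch_alt seq n_mismatch bases
instance (seq : String) (n_mismatch : Int) (bases : String) (out : List String) : Decidable (Spec_findall_mismatch seq n_mismatch bases out) := by unfold Spec_findall_mismatch; infer_instance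

-- ===== CLAIM (what is proved, stated in full; the proofs are below) =====
def Claim_equal_findall_mismatch : Prop := ∀ (seq : String) (n_mismatch : Int) (bases : String), Dom_findall_mismatch seq n_mismatch bases → Pre_findall_mismatch seq n_mismatch bases → Spec_findall_mismatch seq n_mismatch bases (findall_mismatch seq n_mismatch bases)

-- ===== LEMMAS AND PROOFS =====

-- ---- proof-side abbreviations (A's per-combination choice lists, B's g and choice lists) ----
def chA (t bs : List Char) (P : List Nat) : List (List Char) :=
  (List.range t.length).map (fun i => if P.contains i then bs else [t.getD i ' '])

def gFM (t bs : List Char) (P : List Nat) : Nat :=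
  pvFirst (fun j => !P.contains j && PySem.Set.contains (PySem.Set.ofList bs) (t.getD j ' '))
    (List.range t.length) t.length

def chB (t bs : List Char) (P : List Nat) : List (List Char) :=
  (List.range t.length).map (fun i =>
    if !P.contains i then [t.getD i ' ']
    else if i < gFM t bs P then PySem.Set.ofList bs
    else (PySem.Set.ofList bs).filter (fun b => b ≠ t.getD i ' '))

-- first-new-occurrence subsequence of a stream relative to an already-seen set
def pvNews {α : Type} [BEq α] [LawfulBEq α] (S : List α) : List α → List α
  | [] => []
  | x :: xs => if S.contains x then pvNews S xs else x :: pvNews (S ++ [x]) xs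

-- pointwise boolean predicate over a list of (choice list, per-position predicate)
def allQ : List (List Char × (Char → Bool)) → List Char → Bool
  | [], [] => true
  | pq :: ps, c :: x => pq.2 c && allQ ps x
  | _, _ => false

def chOf (ps : List (List Char × (Char → Bool))) : List (List Char) :=
  ps.map (fun pq => (PySem.Set.ofList pq.1).filter pq.2)

-- ---- generic list lemmas ----
theorem pvNews_append {α : Type} [BEq α] [LawfulBEq α] (u v : List α) : ∀ (S : List α),
    pvNews S (u ++ v) = pvNews S u ++ pvNews (S ++ pvNews S u) v := by
  induction u with
  | nil => intro S; simp [pvNews]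
  | cons x u ih =>
    intro S
    by_cases hx : x ∈ S
    · simp [pvNews, hx, ih]
    · simp [pvNews, hx, ih, List.append_assoc]

theorem pvNews_eq_nil {α : Type} [BEq α] [LawfulBEq α] (u S : List α) (h : ∀ x ∈ u, x ∈ S) :
    pvNews S u = [] := by
  induction u generalizing S with
  | nil => simp [pvNews]
  | cons x u ih =>
    have hx : x ∈ S := h x (by simp)
    have hcx : S.contains x = true := by simpa using hx
    simp only [pvNews, hcx, if_true]
    exact ih S (fun y hy => h y (by simp [hy]))

theorem pvNews_eq_self {α : Type} [BEq α] [LawfulBEq α] (u S : List α) (hu : u.Nodup)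
    (h : ∀ x ∈ u, x ∉ S) : pvNews S u = u := by
  induction u generalizing S with
  | nil => simp [pvNews]
  | cons x u ih =>
    have hx : x ∉ S := h x (by simp)
    have hcx : S.contains x = false := by simpa using hx
    simp only [pvNews, hcx, Bool.false_eq_true, if_false]
    rw [ih (S ++ [x]) hu.of_cons]
    intro y hy
    simp only [List.mem_append, List.mem_singleton]
    rintro (h1 | rfl)
    · exact h y (by simp [hy]) h1
    · exact (List.nodup_cons.mp hu).1 hy

theorem pvNews_map_inj {α β : Type} [BEq α] [LawfulBEq α] [BEq β] [LawfulBEq β] (f : α → β)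
    (hf : Function.Injective f) (u : List α) : ∀ (S : List β) (S₀ : List α),
    (∀ x ∈ u, (f x ∈ S ↔ x ∈ S₀)) → pvNews S (u.map f) = (pvNews S₀ u).map f := by
  induction u with
  | nil => intro S S₀ _; simp [pvNews]
  | cons x u ih =>
    intro S S₀ h
    have hx := h x (by simp)
    by_cases hm : x ∈ S₀
    · have hc1 : S.contains (f x) = true := by simpa using hx.mpr hm
      have hc2 : S₀.contains x = true := by simpa using hm
      simp only [List.map_cons, pvNews, hc1, hc2, if_true]
      exact ih S S₀ (fun y hy => h y (by simp [hy]))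
    · have hc1 : S.contains (f x) = false := by
        simpa using fun hc => hm (hx.mp hc)
      have hc2 : S₀.contains x = false := by simpa using hm
      simp only [List.map_cons, pvNews, hc1, hc2, Bool.false_eq_true, if_false, List.map_cons]
      congr 1
      refine ih (S ++ [f x]) (S₀ ++ [x]) ?_
      intro y hy
      simp only [List.mem_append, List.mem_singleton]
      constructor
      · rintro (h1 | h1)
        · exact Or.inl ((h y (by simp [hy])).mp h1)
        · exact Or.inr (hf h1)
      · rintro (h1 | rfl)
        · exact Or.inl ((h y (by simp [hy])).mpr h1)
        · exact Or.inr rfl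

theorem foldl_add_eq_news {α : Type} [BEq α] [LawfulBEq α] (l : List α) : ∀ (S : PySem.Set α),
    l.foldl PySem.Set.add S = S ++ pvNews S l := by
  induction l with
  | nil => intro S; simp [pvNews]
  | cons x l ih =>
    intro S
    by_cases hx : x ∈ S
    · have hcx : List.contains S x = true := by simpa using hx
      simp only [List.foldl_cons, PySem.Set.add_of_mem hx, pvNews, hcx, if_true, ih]
    · have hcx : List.contains S x = false := by simpa using hx
      simp only [List.foldl_cons, PySem.Set.add_of_not_mem hx, pvNews, hcx, Bool.false_eq_true,
        if_false, ih, List.append_assoc, List.singleton_append]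

theorem lex_of_mem_diff : ∀ (a b : List Nat) (m : Nat), a.Pairwise (· < ·) → b.Pairwise (· < ·) →
    a.length = b.length → m ∈ a → m ∉ b → (∀ x ∈ b, x < m → x ∈ a) →
    List.Lex (· < ·) a b := by
  intro a
  induction a with
  | nil => intro b m _ _ hlen hma _ _; exact absurd hma (by simp)
  | cons x a ih =>
    intro b m ha hb hlen hma hmb hbelow
    cases b with
    | nil => simp at hlen
    | cons y b =>
      rcases Nat.lt_trichotomy x y with hxy | hxy | hxy
      · exact List.Lex.rel hxy
      · subst hxy
        have hm' : m ∈ a := by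
          rcases List.mem_cons.mp hma with rfl | h1
          · exact absurd (List.mem_cons_self) hmb
          · exact h1
        refine List.Lex.cons (ih b m ha.of_cons hb.of_cons (by simpa using hlen) hm'
          (fun hc => hmb (by simp [hc])) ?_)
        intro z hz hzm
        have hyz := (List.pairwise_cons.mp hb).1 z hz
        rcases List.mem_cons.mp (hbelow z (by simp [hz]) hzm) with h1 | h1
        · omega
        · exact h1
      · -- y < x : y ∈ b-side head; show contradiction via hbelow
        exfalso
        have hym : y < m := by
          rcases List.mem_cons.mp hma with rfl | h1
          · omega
          · have := (List.pairwise_cons.mp ha).1 m h1; omega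
        have hy : y ∈ x :: a := hbelow y (by simp) hym
        rcases List.mem_cons.mp hy with rfl | h1
        · omega
        · have := (List.pairwise_cons.mp ha).1 y h1; omega

theorem perm_of_nodup_mem_iff : ∀ (a b : List Nat), a.Nodup → b.Nodup →
    (∀ x, x ∈ a ↔ x ∈ b) → a.Perm b := by
  intro a b ha hb hm
  exact (List.perm_ext_iff_of_nodup ha hb).mpr hm

-- ---- pvCombs / pvProd characterizations ----
theorem mem_pvCombs : ∀ (k : Nat) (l : List Nat) (C : List Nat),
    C ∈ pvCombs k l ↔ C.length = k ∧ C.Sublist l := by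
  intro k
  induction k using Nat.strong_induction_on with
  | _ k ihk =>
  intro l
  induction l with
  | nil =>
    intro C
    cases k with
    | zero =>
      simp only [pvCombs, List.mem_singleton, List.sublist_nil, List.length_eq_zero_iff]
      tauto
    | succ k =>
      simp only [pvCombs, List.not_mem_nil, false_iff, not_and]
      intro hlen hsub
      have := hsub.length_le; simp only [List.length_nil] at this; omega
  | cons x xs ihl =>
    intro C
    cases k with
    | zero =>
      simp only [pvCombs, List.mem_singleton]
      constructor
      · rintro rfl; exact ⟨rfl, List.nil_sublist _⟩
      · rintro ⟨hlen, _⟩; exact List.length_eq_zero_iff.mp hlen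
    | succ k =>
      simp only [pvCombs, List.mem_append, List.mem_map]
      constructor
      · rintro (⟨c, hc, rfl⟩ | h)
        · have := (ihk k (by omega) xs c).mp hc
          exact ⟨by simp [this.1], List.cons_sublist_cons.mpr this.2⟩
        · rcases (ihl C).mp h with ⟨hlen, hsub⟩
          exact ⟨hlen, hsub.trans (List.sublist_cons_self x xs)⟩
      · rintro ⟨hlen, hsub⟩
        rcases List.sublist_cons_iff.mp hsub with h | ⟨r, rfl, hr⟩
        · exact Or.inr ((ihl C).mpr ⟨hlen, h⟩)
        · exact Or.inl ⟨r, (ihk k (by omega) xs r).mpr ⟨by simpa using hlen, hr⟩, rfl⟩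

theorem pvCombs_pairwise_lex : ∀ (k : Nat) (l : List Nat), l.Pairwise (· < ·) →
    (pvCombs k l).Pairwise (fun a b => List.Lex (· < ·) a b) := by
  intro k
  induction k using Nat.strong_induction_on with
  | _ k ihk =>
  intro l
  induction l with
  | nil => cases k <;> simp [pvCombs]
  | cons x xs ihl =>
    intro hl
    cases k with
    | zero => simp [pvCombs]
    | succ k =>
      simp only [pvCombs]
      rw [List.pairwise_append]
      refine ⟨?_, ihl hl.of_cons, ?_⟩
      · rw [List.pairwise_map]
        exact (ihk k (by omega) xs hl.of_cons).imp (fun h => List.Lex.cons h)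
      · rintro a ha b hb
        rcases List.mem_map.mp ha with ⟨c, _, rfl⟩
        have hbx : b.length = k + 1 ∧ b.Sublist xs := (mem_pvCombs (k+1) xs b).mp hb
        cases b with
        | nil => simp at hbx
        | cons y b =>
          have hy : y ∈ xs := (hbx.2.subset) (by simp)
          exact List.Lex.rel ((List.pairwise_cons.mp hl).1 y hy)

theorem mem_pvProd : ∀ (ls : List (List Char)) (x : List Char),
    x ∈ pvProd ls ↔ List.Forall₂ (· ∈ ·) x ls := by
  intro ls
  induction ls with
  | nil =>
    intro x
    simp only [pvProd, List.mem_singleton]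
    constructor
    · rintro rfl; exact List.Forall₂.nil
    · intro h; cases h; rfl
  | cons l ls ih =>
    intro x
    simp only [pvProd, List.mem_flatMap, List.mem_map]
    constructor
    · rintro ⟨c, hc, y, hy, rfl⟩
      exact List.Forall₂.cons hc ((ih y).mp hy)
    · intro h
      cases h with
      | cons hc hy => exact ⟨_, hc, _, (ih _).mpr hy, rfl⟩

theorem mem_pvProd_map_range (f : Nat → List Char) (L : Nat) (x : List Char) :
    x ∈ pvProd ((List.range L).map f) ↔
      x.length = L ∧ ∀ i, i < L → x.getD i ' ' ∈ f i := by
  rw [mem_pvProd, List.forall₂_iff_get]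
  simp only [List.length_map, List.length_range]
  constructor
  · rintro ⟨hlen, hget⟩
    refine ⟨hlen, fun i hi => ?_⟩
    have := hget i (by omega) (by simpa using hi)
    simpa [List.getD_eq_getElem, hlen ▸ hi] using this
  · rintro ⟨hlen, h⟩
    refine ⟨hlen, fun i h1 h2 => ?_⟩
    have hi : i < L := by simpa using h2
    have := h i hi
    rw [List.getD_eq_getElem _ _ (by omega)] at this
    simpa [List.get_eq_getElem] using this

theorem pvProd_nodup : ∀ (ls : List (List Char)), (∀ l ∈ ls, l.Nodup) → (pvProd ls).Nodup := by
  intro ls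
  induction ls with
  | nil => intro _; simp [pvProd]
  | cons l ls ih =>
    intro h
    simp only [pvProd]
    have hl : l.Nodup := h l (by simp)
    have hls := ih (fun l' hl' => h l' (by simp [hl']))
    rw [List.nodup_flatMap]
    constructor
    · intro c _
      exact hls.map (fun a b h => by injection h)
    · -- pairwise disjointness of segments: different head chars
      exact hl.imp (fun {a b} hab => by
        intro z hza hzb
        rcases List.mem_map.mp hza with ⟨y, _, rfl⟩
        rcases List.mem_map.mp hzb with ⟨y', _, hy'⟩
        exact hab (by injection hy' with h1 _; exact h1.symm))

-- ---- pvFirst facts ----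
theorem pvFirst_le (p : Nat → Bool) : ∀ (l : List Nat) (d j : Nat), l.Pairwise (· < ·) →
    j ∈ l → p j = true → pvFirst p l d ≤ j := by
  intro l
  induction l with
  | nil => intro d j _ hj; simp at hj
  | cons a l ih =>
    intro d j hl hj hp
    simp only [pvFirst]
    by_cases ha : p a = true
    · rw [if_pos ha]
      rcases List.mem_cons.mp hj with rfl | hj
      · exact le_refl j
      · exact le_of_lt ((List.pairwise_cons.mp hl).1 j hj)
    · rw [if_neg ha]
      rcases List.mem_cons.mp hj with rfl | hj
      · exact absurd hp ha
      · exact ih d j hl.of_cons hj hp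

theorem pvFirst_cases (p : Nat → Bool) : ∀ (l : List Nat) (d : Nat),
    pvFirst p l d = d ∨ (pvFirst p l d ∈ l ∧ p (pvFirst p l d) = true) := by
  intro l
  induction l with
  | nil => intro d; simp [pvFirst]
  | cons a l ih =>
    intro d
    simp only [pvFirst]
    by_cases ha : p a = true
    · rw [if_pos ha]; exact Or.inr ⟨by simp, ha⟩
    · rw [if_neg ha]
      rcases ih d with h | ⟨h1, h2⟩
      · exact Or.inl h
      · exact Or.inr ⟨by simp [h1], h2⟩

theorem pvFirst_min (p : Nat → Bool) (L j : Nat) (hj : j < L) (hp : p j = true) :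
    pvFirst p (List.range L) L ≤ j := by
  exact pvFirst_le p (List.range L) L j (List.pairwise_lt_range) (List.mem_range.mpr hj) hp

theorem pvFirst_holds (p : Nat → Bool) (L : Nat) (h : pvFirst p (List.range L) L < L) :
    p (pvFirst p (List.range L) L) = true := by
  rcases pvFirst_cases p (List.range L) L with hc | ⟨_, h2⟩
  · omega
  · exact h2

-- ---- A's seq_locs equals chA ----
theorem seq_locs_eq_chA (t bs : List Char) (P : List Nat) (hP : ∀ i ∈ P, i < t.length) :
    P.foldl (fun sl loc => sl.set loc bs) (t.map (fun c => [c])) = chA t bs P := by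
  have hgetD : ∀ (P : List Nat) (init : List (List Char)), (∀ i ∈ P, i < init.length) →
      ∀ j, (P.foldl (fun sl loc => sl.set loc bs) init).getD j [] =
        if j ∈ P then bs else init.getD j [] := by
    intro P
    induction P with
    | nil => intro init _ j; simp
    | cons p P ih =>
      intro init hb j
      have hp : p < init.length := hb p (by simp)
      rw [List.foldl_cons, ih (init.set p bs) (by simpa using fun i hi => hb i (by simp [hi])) j]
      by_cases hj : j ∈ P
      · simp [hj]
      · rw [if_neg hj]
        have hset : (init.set p bs).getD j [] = if p = j then bs else init.getD j [] := by
          rcases Nat.lt_or_ge j init.length with h2 | h2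
          · rw [List.getD_eq_getElem _ _ (by simpa using h2), List.getD_eq_getElem _ _ h2,
              List.getElem_set]
          · rw [List.getD_eq_default _ _ (by simpa using h2), List.getD_eq_default _ _ h2,
              if_neg (by omega)]
        rw [hset]
        by_cases hpj : p = j
        · subst hpj; simp
        · rw [if_neg hpj, if_neg (fun h => by
            rcases List.mem_cons.mp h with rfl | h
            · exact hpj rfl
            · exact hj h)]
  have hlen : ∀ (P : List Nat) (init : List (List Char)),
      (P.foldl (fun sl loc => sl.set loc bs) init).length = init.length := by
    intro P
    induction P with
    | nil => intro init; rfl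
    | cons p P ih => intro init; rw [List.foldl_cons, ih]; simp
  apply List.ext_getElem
  · rw [hlen]; simp [chA]
  · intro i h1 h2
    have hi : i < t.length := by simpa [chA] using h2
    have hL : (P.foldl (fun sl loc => sl.set loc bs) (t.map fun c => [c])).length = t.length := by
      rw [hlen]; simp
    rw [← List.getD_eq_getElem _ [] h1, ← List.getD_eq_getElem _ [] h2,
      hgetD P _ (by simpa using hP) i]
    simp only [chA]
    by_cases hip : i ∈ P
    · rw [if_pos hip, List.getD_eq_getElem _ [] (by simpa using hi),
        List.getElem_map, List.getElem_range, if_pos (by simpa using hip)]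
    · rw [if_neg hip, List.getD_eq_getElem _ [] (by simpa using hi), List.getElem_map]
      rw [List.getD_eq_getElem _ [] (by simpa using hi), List.getElem_map,
        List.getElem_range, if_neg (by simpa using hip), List.getD_eq_getElem _ ' ' hi]

-- ---- stream membership characterizations ----
theorem mem_chA_iff (t bs : List Char) (P : List Nat) (x : List Char) :
    x ∈ pvProd (chA t bs P) ↔ x.length = t.length ∧
      (∀ i, i < t.length → P.contains i = true → x.getD i ' ' ∈ bs) ∧
      (∀ i, i < t.length → P.contains i = false → x.getD i ' ' = t.getD i ' ') := by
  rw [chA, mem_pvProd_map_range]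
  constructor
  · rintro ⟨hlen, h⟩
    refine ⟨hlen, fun i hi hci => ?_, fun i hi hci => ?_⟩
    · have := h i hi; rw [if_pos hci] at this; exact this
    · have := h i hi; rw [if_neg (by simpa using hci)] at this; simpa using this
  · rintro ⟨hlen, h1, h2⟩
    refine ⟨hlen, fun i hi => ?_⟩
    by_cases hci : P.contains i
    · rw [if_pos hci]; exact h1 i hi hci
    · rw [if_neg hci]
      simp only [List.mem_singleton]
      exact h2 i hi (by simpa using hci)

theorem mem_chB_iff (t bs : List Char) (P : List Nat) (x : List Char) :
    x ∈ pvProd (chB t bs P) ↔ x ∈ pvProd (chA t bs P) ∧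
      (∀ i, i < t.length → P.contains i = true → gFM t bs P ≤ i →
        x.getD i ' ' ≠ t.getD i ' ') := by
  rw [chB, mem_pvProd_map_range, mem_chA_iff]
  constructor
  · rintro ⟨hlen, h⟩
    refine ⟨⟨hlen, fun i hi hci => ?_, fun i hi hci => ?_⟩, fun i hi hci hgi => ?_⟩
    · have hiP : i ∈ P := by simpa using hci
      have := h i hi
      rw [if_neg (by simp [hiP])] at this
      by_cases hg : i < gFM t bs P
      · rw [if_pos hg] at this; exact (PySem.List.mem_dedup bs _).mp this
      · rw [if_neg hg] at this
        exact (PySem.List.mem_dedup bs _).mp (List.mem_of_mem_filter this)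
    · have hnP : i ∉ P := by simpa using hci
      have := h i hi; rw [if_pos (by simp [hnP])] at this; simpa using this
    · have hiP : i ∈ P := by simpa using hci
      have := h i hi
      rw [if_neg (by simp [hiP]), if_neg (by omega)] at this
      have := List.of_mem_filter this
      simpa using this
  · rintro ⟨⟨hlen, h1, h2⟩, h3⟩
    refine ⟨hlen, fun i hi => ?_⟩
    by_cases hci : P.contains i
    · have hiP : i ∈ P := by simpa using hci
      rw [if_neg (by simp [hiP])]
      by_cases hg : i < gFM t bs P
      · rw [if_pos hg]; exact (PySem.List.mem_dedup bs _).mpr (h1 i hi hci)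
      · rw [if_neg hg]
        refine List.mem_filter.mpr ⟨(PySem.List.mem_dedup bs _).mpr (h1 i hi hci), ?_⟩
        simpa using h3 i hi hci (by omega)
    · have hnP : i ∉ P := by simpa using hci
      rw [if_pos (by simp [hnP])]
      simp only [List.mem_singleton]
      exact h2 i hi (by simpa using hci)

theorem ofList_eq_pvNews (l : List Char) : PySem.Set.ofList l = pvNews [] l := by
  have h := foldl_add_eq_news l []
  rw [PySem.Set.ofList_eq_foldl, h]
  simp

theorem mem_pvProd_chOf : ∀ (ps : List (List Char × (Char → Bool))) (y : List Char),
    y ∈ pvProd (chOf ps) ↔ y ∈ pvProd (ps.map Prod.fst) ∧ allQ ps y = true := by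
  intro ps
  induction ps with
  | nil =>
    intro y
    simp only [chOf, List.map_nil, pvProd, List.mem_singleton]
    constructor
    · rintro rfl; exact ⟨rfl, rfl⟩
    · rintro ⟨h, _⟩; exact h
  | cons pq ps ih =>
    intro y
    simp only [chOf, List.map_cons, pvProd, List.mem_flatMap, List.mem_map]
    constructor
    · rintro ⟨c, hc, y', hy', rfl⟩
      rcases List.mem_filter.mp hc with ⟨hc1, hc2⟩
      rcases (ih y').mp hy' with ⟨h1, h2⟩
      exact ⟨⟨c, (PySem.List.mem_dedup _ _).mp hc1, y', h1, rfl⟩, by simp [allQ, hc2, h2]⟩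
    · rintro ⟨⟨c, hc, y', hy', rfl⟩, hq⟩
      simp only [allQ, Bool.and_eq_true] at hq
      exact ⟨c, List.mem_filter.mpr ⟨(PySem.List.mem_dedup _ _).mpr hc, hq.1⟩, y',
        (ih y').mpr ⟨hy', hq.2⟩, rfl⟩

-- ---- the within-combination dedup lemma ----
theorem news_prod : ∀ (ps : List (List Char × (Char → Bool))) (S : List (List Char)),
    (∀ x ∈ pvProd (ps.map Prod.fst), (x ∈ S ↔ allQ ps x = false)) →
    pvNews S (pvProd (ps.map Prod.fst)) = pvProd (chOf ps) := by
  intro ps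
  induction ps with
  | nil =>
    intro S H
    have h0 : [] ∉ S := by
      intro hc
      have := (H [] (by simp [pvProd])).mp hc
      simp [allQ] at this
    have hcx : S.contains ([] : List Char) = false := by simpa using h0
    simp only [List.map_nil, pvProd, chOf, pvNews, hcx, Bool.false_eq_true, if_false]
  | cons pq ps ih =>
    intro S H
    obtain ⟨l, q⟩ := pq
    have inner : ∀ (l' : List Char) (cs : List Char) (S' : List (List Char)),
        (∀ c ∈ l', ∀ y ∈ pvProd (ps.map Prod.fst),
          ((c :: y) ∈ S' ↔ ((q c && allQ ps y) = false ∨ c ∈ cs))) →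
        pvNews S' (l'.flatMap (fun c => (pvProd (ps.map Prod.fst)).map (fun p => c :: p)))
          = ((pvNews cs l').filter q).flatMap
              (fun c => (pvProd (chOf ps)).map (fun p => c :: p)) := by
      intro l'
      induction l' with
      | nil => intro cs S' _; simp [pvNews]
      | cons c l'' ihl =>
        intro cs S' hinv
        rw [List.flatMap_cons, pvNews_append]
        by_cases hc : c ∈ cs
        · have hnil : pvNews S' ((pvProd (ps.map Prod.fst)).map (fun p => c :: p)) = [] := by
            apply pvNews_eq_nil
            intro z hz
            rcases List.mem_map.mp hz with ⟨y, hy, rfl⟩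
            exact (hinv c (by simp) y hy).mpr (Or.inr hc)
          rw [hnil]
          simp only [List.append_nil, List.nil_append]
          rw [show pvNews cs (c :: l'') = pvNews cs l'' by simp [pvNews, hc]]
          exact ihl cs S' (fun c' hc' y hy => hinv c' (by simp [hc']) y hy)
        · by_cases hq : q c = true
          · have hseg : pvNews S' ((pvProd (ps.map Prod.fst)).map (fun p => c :: p))
                = (pvProd (chOf ps)).map (fun p => c :: p) := by
              have hmi := pvNews_map_inj (fun p : List Char => c :: p)
                (fun a b h => by injection h) (pvProd (ps.map Prod.fst)) S'
                ((pvProd (ps.map Prod.fst)).filter (fun y => !allQ ps y))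
                (fun y hy => by
                  rw [hinv c (by simp) y hy]
                  simp [hq, List.mem_filter, hy, hc])
              rw [hmi, ih _ (fun y hy => by simp [List.mem_filter, hy])]
            rw [hseg]
            rw [show pvNews cs (c :: l'') = c :: pvNews (cs ++ [c]) l'' by simp [pvNews, hc]]
            rw [List.filter_cons_of_pos hq, List.flatMap_cons]
            congr 1
            apply ihl (cs ++ [c])
            intro c' hc' y hy
            constructor
            · intro hz
              rcases List.mem_append.mp hz with hz | hz
              · rcases (hinv c' (by simp [hc']) y hy).mp hz with h | h
                · exact Or.inl h
                · exact Or.inr (by simp [h])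
              · rcases List.mem_map.mp hz with ⟨y', hy', heq⟩
                injection heq with h1 h2
                subst h1; subst h2
                exact Or.inr (by simp)
            · intro hz
              rcases hz with hz | hz
              · exact List.mem_append.mpr (Or.inl ((hinv c' (by simp [hc']) y hy).mpr (Or.inl hz)))
              · rcases List.mem_append.mp hz with hz | hz
                · exact List.mem_append.mpr
                    (Or.inl ((hinv c' (by simp [hc']) y hy).mpr (Or.inr hz)))
                · have hcc : c' = c := by simpa using hz
                  subst hcc
                  by_cases hall : allQ ps y = true
                  · refine List.mem_append.mpr (Or.inr ?_)
                    exact List.mem_map.mpr ⟨y, (mem_pvProd_chOf ps y).mpr ⟨hy, hall⟩, rfl⟩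
                  · refine List.mem_append.mpr
                      (Or.inl ((hinv c' (by simp) y hy).mpr (Or.inl ?_)))
                    simp [Bool.eq_false_iff.mpr hall]
          · have hnil : pvNews S' ((pvProd (ps.map Prod.fst)).map (fun p => c :: p)) = [] := by
              apply pvNews_eq_nil
              intro z hz
              rcases List.mem_map.mp hz with ⟨y, hy, rfl⟩
              refine (hinv c (by simp) y hy).mpr (Or.inl ?_)
              simp [hq]
            rw [hnil]
            simp only [List.append_nil, List.nil_append]
            rw [show pvNews cs (c :: l'') = c :: pvNews (cs ++ [c]) l'' by simp [pvNews, hc]]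
            rw [List.filter_cons_of_neg (by simp [hq])]
            apply ihl (cs ++ [c])
            intro c' hc' y hy
            rw [hinv c' (by simp [hc']) y hy]
            by_cases hcc : c' = c
            · subst hcc
              simp [hq]
            · simp [hcc]
    have hmain := inner l [] S (fun c hc y hy => by
      rw [H (c :: y) (by
        simp only [List.map_cons, pvProd, List.mem_flatMap, List.mem_map]
        exact ⟨c, hc, y, hy, rfl⟩)]
      simp [allQ])
    simp only [List.map_cons, pvProd, chOf]
    rw [hmain, ← ofList_eq_pvNews]
    rfl

-- ---- psOf: the pair list realizing chA / chB for a combination ----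
def psOf (t bs : List Char) (P : List Nat) : List (List Char × (Char → Bool)) :=
  (List.range t.length).map (fun i =>
    (if P.contains i then bs else [t.getD i ' '],
     fun c => !(P.contains i && decide (gFM t bs P ≤ i) && (c == t.getD i ' '))))

theorem psOf_fst (t bs : List Char) (P : List Nat) : (psOf t bs P).map Prod.fst = chA t bs P := by
  rw [psOf, chA, List.map_map]
  rfl

theorem chOf_psOf (t bs : List Char) (P : List Nat) (hP : ∀ i ∈ P, i < t.length) :
    chOf (psOf t bs P) = chB t bs P := by
  rw [chOf, psOf, chB, List.map_map]
  apply List.map_congr_left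
  intro i hi
  have hiL : i < t.length := List.mem_range.mp hi
  simp only [Function.comp]
  by_cases hci : P.contains i
  · have hiP : i ∈ P := by simpa using hci
    rw [if_pos hci]
    by_cases hg : i < gFM t bs P
    · rw [if_neg (by simp [hiP]), if_pos hg]
      apply List.filter_eq_self.mpr
      intro c _
      simp [Nat.not_le.mpr hg]
    · rw [if_neg (by simp [hiP]), if_neg hg]
      apply List.filter_congr
      intro c _
      simp [hiP, Nat.le_of_not_lt hg, beq_eq_decide]
  · have hnP : i ∉ P := by simpa using hci
    rw [if_neg hci, if_pos (by simp [hnP])]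
    have : PySem.Set.ofList [t.getD i ' '] = [t.getD i ' '] := by
      apply PySem.Set.ofList_eq_self_of_nodup; simp
    rw [this]
    apply List.filter_eq_self.mpr
    intro c _
    simp [hnP]

theorem allQ_psOf_iff (t bs : List Char) (P : List Nat) (x : List Char)
    (hx : x ∈ pvProd (chA t bs P)) (hP : ∀ i ∈ P, i < t.length) :
    allQ (psOf t bs P) x = true ↔
      (∀ i, i < t.length → P.contains i = true → gFM t bs P ≤ i →
        x.getD i ' ' ≠ t.getD i ' ') := by
  have hx' := (mem_chA_iff t bs P x).mp hx
  obtain ⟨hlen, hmem, hoff⟩ := hx'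
  have hQ : ∀ (ps : List (List Char × (Char → Bool))) (y : List Char), y.length = ps.length →
      (allQ ps y = true ↔ ∀ i, i < ps.length → (ps.getD i ([], fun _ => true)).2 (y.getD i ' ') = true) := by
    intro ps
    induction ps with
    | nil =>
      intro y hy
      cases y with
      | nil => simp [allQ]
      | cons c y => simp at hy
    | cons pq ps ih =>
      intro y hy
      cases y with
      | nil => simp at hy
      | cons c y =>
        simp only [allQ, Bool.and_eq_true]
        rw [ih y (by simpa using hy)]
        constructor
        · rintro ⟨h1, h2⟩ i hi
          cases i with
          | zero => simpa using h1
          | succ i => simpa using h2 i (by simpa using hi)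
        · intro h
          refine ⟨by simpa using h 0 (by simp), fun i hi => ?_⟩
          simpa using h (i + 1) (by simpa using hi)
  rw [hQ (psOf t bs P) x (by simp [psOf, hlen])]
  have hget : ∀ i, i < t.length →
      ((psOf t bs P).getD i ([], fun _ => true)).2 =
        fun c => !(P.contains i && decide (gFM t bs P ≤ i) && (c == t.getD i ' ')) := by
    intro i hi
    rw [psOf, List.getD_eq_getElem _ _ (by simpa using hi)]
    simp
  constructor
  · intro h i hi hci hgi
    have hiP : i ∈ P := by simpa using hci
    have h2 := h i (by simpa [psOf] using hi)
    rw [hget i hi] at h2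
    simpa [hiP, hgi] using h2
  · intro h i hi
    have hiL : i < t.length := by simpa [psOf] using hi
    rw [hget i hiL]
    by_cases hci : P.contains i
    · have hiP : i ∈ P := by simpa using hci
      by_cases hgi : gFM t bs P ≤ i
      · have hne := h i hiL hci hgi
        simp only [hci, hgi, decide_true, Bool.true_and, Bool.and_true, Bool.not_eq_true',
          beq_eq_false_iff_ne, ne_eq]
        exact hne
      · simp [Nat.lt_of_not_le hgi]
    · have hnP : i ∉ P := by simpa using hci
      simp [hnP]

-- ---- the cross-combination ("no earlier / exists earlier") lemmas ----
theorem no_earlier (t bs : List Char) (x : List Char) : ∀ {Q P : List Nat},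
    List.Lex (· < ·) Q P → ∀ (E : List Nat),
    Q.Pairwise (· < ·) → P.Pairwise (· < ·) → Q.length = P.length →
    (∀ e ∈ E, ∀ i ∈ P, e < i) → (∀ e ∈ E, ∀ i ∈ Q, e < i) →
    (∀ i, i < t.length → i ∉ E → i ∉ P → x.getD i ' ' = t.getD i ' ') →
    (∀ i, i < t.length → i ∉ E → i ∉ Q → x.getD i ' ' = t.getD i ' ') →
    (∀ i ∈ P, i < t.length ∧ x.getD i ' ' ∈ bs) →
    (∀ i ∈ Q, i < t.length ∧ x.getD i ' ' ∈ bs) →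
    (∀ i ∈ P, x.getD i ' ' = t.getD i ' ' →
      ∀ j, j < i → j ∉ E → j ∉ P → t.getD j ' ' ∈ bs → False) →
    False := by
  intro Q P hlex
  induction hlex with
  | nil =>
    intro E _ _ hlen _ _ _ _ _ _ _
    simp at hlen
  | @rel a l₁ b l₂ hab =>
    intro E hQs hPs hlen hEP hEQ hagP hagQ hmemP hmemQ hg
    have haP : a ∉ b :: l₂ := by
      intro hmem
      rcases List.mem_cons.mp hmem with h | h
      · omega
      · have := (List.pairwise_cons.mp hPs).1 a h; omega
    have haL : a < t.length := (hmemQ a (by simp)).1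
    have haE : a ∉ E := fun he => absurd (hEQ a he a (by simp)) (lt_irrefl a)
    have hxa : x.getD a ' ' = t.getD a ' ' := hagP a haL haE haP
    have htb : t.getD a ' ' ∈ bs := hxa ▸ (hmemQ a (by simp)).2
    have hmis : ∀ i ∈ b :: l₂, x.getD i ' ' ≠ t.getD i ' ' := by
      intro i hi heq
      refine hg i hi heq a ?_ haE haP htb
      rcases List.mem_cons.mp hi with rfl | h
      · omega
      · have := (List.pairwise_cons.mp hPs).1 i h; omega
    have hPl : ∀ i ∈ b :: l₂, i ∈ l₁ := by
      intro i hi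
      have hiE : i ∉ E := fun he => absurd (hEP i he i hi) (lt_irrefl i)
      by_cases hiQ : i ∈ a :: l₁
      · rcases List.mem_cons.mp hiQ with rfl | h
        · exact absurd hi haP
        · exact h
      · exact absurd (hagQ i (hmemP i hi).1 hiE hiQ) (hmis i hi)
    have hnd : (b :: l₂).Nodup := hPs.imp (fun h => Nat.ne_of_lt h)
    have hsub : (b :: l₂) ⊆ l₁ := fun i hi => hPl i hi
    have := (List.subperm_of_subset hnd hsub).length_le
    simp only [List.length_cons] at this hlen
    omega
  | @cons a l₁ l₂ hlex ihl =>
    intro E hQs hPs hlen hEP hEQ hagP hagQ hmemP hmemQ hg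
    refine ihl (E ++ [a]) hQs.of_cons hPs.of_cons (by simpa using hlen) ?_ ?_ ?_ ?_ ?_ ?_ ?_
    · intro e he i hi
      rcases List.mem_append.mp he with he | he
      · exact hEP e he i (by simp [hi])
      · have : e = a := by simpa using he
        subst this
        exact (List.pairwise_cons.mp hPs).1 i hi
    · intro e he i hi
      rcases List.mem_append.mp he with he | he
      · exact hEQ e he i (by simp [hi])
      · have : e = a := by simpa using he
        subst this
        exact (List.pairwise_cons.mp hQs).1 i hi
    · intro i hiL hiE hiP
      refine hagP i hiL (fun h => hiE (by simp [h])) ?_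
      intro h
      rcases List.mem_cons.mp h with rfl | h
      · exact hiE (by simp)
      · exact hiP h
    · intro i hiL hiE hiQ
      refine hagQ i hiL (fun h => hiE (by simp [h])) ?_
      intro h
      rcases List.mem_cons.mp h with rfl | h
      · exact hiE (by simp)
      · exact hiQ h
    · intro i hi; exact hmemP i (by simp [hi])
    · intro i hi; exact hmemQ i (by simp [hi])
    · intro i hi hmatch j hj hjE hjP
      refine hg i (by simp [hi]) hmatch j hj (fun h => hjE (by simp [h])) ?_ 
      intro h
      rcases List.mem_cons.mp h with rfl | h
      · exact hjE (by simp)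
      · exact hjP h

theorem exists_earlier (t bs : List Char) (k : Nat) (P : List Nat) (x : List Char)
    (hP : P ∈ pvCombs k (List.range t.length)) (hx : x ∈ pvProd (chA t bs P))
    (i : Nat) (hi : i ∈ P) (hgi : gFM t bs P ≤ i) (hm : x.getD i ' ' = t.getD i ' ') :
    ∃ Q ∈ pvCombs k (List.range t.length), List.Lex (· < ·) Q P ∧
      x ∈ pvProd (chA t bs Q) ∧ Q.sum < P.sum := by
  rcases (mem_pvCombs k (List.range t.length) P).mp hP with ⟨hlenP, hsubP⟩
  have hPs : P.Pairwise (· < ·) := List.Pairwise.sublist hsubP List.pairwise_lt_range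
  have hPnd : P.Nodup := hPs.imp (fun h => Nat.ne_of_lt h)
  have hPlt : ∀ j ∈ P, j < t.length := fun j hj => List.mem_range.mp (hsubP.subset hj)
  have hiL : i < t.length := hPlt i hi
  have hgL : gFM t bs P < t.length := Nat.lt_of_le_of_lt hgi hiL
  have hgp : (!P.contains (gFM t bs P) &&
      PySem.Set.contains (PySem.Set.ofList bs) (t.getD (gFM t bs P) ' ')) = true :=
    pvFirst_holds _ t.length hgL
  simp only [Bool.and_eq_true, Bool.not_eq_true'] at hgp
  have hgP : gFM t bs P ∉ P := by simpa using hgp.1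
  have htg : t.getD (gFM t bs P) ' ' ∈ bs :=
    (PySem.List.mem_dedup _ _).mp ((PySem.Set.contains_iff _ _).mp hgp.2)
  have hgi' : gFM t bs P < i := by
    rcases Nat.lt_or_ge (gFM t bs P) i with h | h
    · exact h
    · have : gFM t bs P = i := by omega
      exact absurd (this ▸ hi) hgP
  set g := gFM t bs P with hgdef
  set Q := (List.range t.length).filter (fun j => (P.contains j && !(j == i)) || j == g) with hQdef
  have memQ : ∀ j, j ∈ Q ↔ j < t.length ∧ ((j ∈ P ∧ j ≠ i) ∨ j = g) := by
    intro j
    simp [hQdef, List.mem_filter, List.mem_range]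
  have hQsub : Q.Sublist (List.range t.length) := List.filter_sublist
  have hQs : Q.Pairwise (· < ·) := List.Pairwise.sublist hQsub List.pairwise_lt_range
  have hQnd : Q.Nodup := hQs.imp (fun h => Nat.ne_of_lt h)
  have hperm : Q.Perm (g :: P.erase i) := by
    apply perm_of_nodup_mem_iff _ _ hQnd
    · refine List.nodup_cons.mpr ⟨fun hc => hgP (List.mem_of_mem_erase hc), hPnd.erase i⟩
    · intro j
      rw [memQ j, List.mem_cons, List.Nodup.mem_erase_iff hPnd]
      constructor
      · rintro ⟨hjL, ⟨hjP, hjne⟩ | rfl⟩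
        · exact Or.inr ⟨hjne, hjP⟩
        · exact Or.inl rfl
      · rintro (rfl | ⟨hjne, hjP⟩)
        · exact ⟨hgL, Or.inr rfl⟩
        · exact ⟨hPlt j hjP, Or.inl ⟨hjP, hjne⟩⟩
  have hQlen : Q.length = k := by
    have h1 := hperm.length_eq
    have h2 : (P.erase i).length = P.length - 1 := List.length_erase_of_mem hi
    have h3 : 1 ≤ P.length := List.length_pos_iff.mpr (List.ne_nil_of_mem hi)  -- name check
    simp only [List.length_cons] at h1
    omega
  have hQmem : Q ∈ pvCombs k (List.range t.length) :=
    (mem_pvCombs k (List.range t.length) Q).mpr ⟨hQlen, hQsub⟩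
  rcases (mem_chA_iff t bs P x).mp hx with ⟨hxlen, hxon, hxoff⟩
  refine ⟨Q, hQmem, ?_, ?_, ?_⟩
  · refine lex_of_mem_diff Q P g hQs hPs (by omega) ((memQ g).mpr ⟨hgL, Or.inr rfl⟩) hgP ?_
    intro j hjP hjg
    exact (memQ j).mpr ⟨hPlt j hjP, Or.inl ⟨hjP, by omega⟩⟩
  · rw [mem_chA_iff]
    refine ⟨hxlen, ?_, ?_⟩
    · intro j hjL hcj
      have hjQ : j ∈ Q := by simpa using hcj
      rcases ((memQ j).mp hjQ).2 with ⟨hjP, _⟩ | heq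
      · exact hxon j hjL (by simpa using hjP)
      · rw [heq, hxoff g hgL (by simpa using hgP)]
        exact htg
    · intro j hjL hcj
      have hjQ : j ∉ Q := by simpa using hcj
      by_cases hjP : j ∈ P
      · by_cases hji : j = i
        · subst hji; exact hm
        · exact absurd ((memQ j).mpr ⟨hjL, Or.inl ⟨hjP, hji⟩⟩) hjQ
      · exact hxoff j hjL (by simpa using hjP)
  · have h1 : Q.sum = g + (P.erase i).sum := by rw [hperm.sum_eq]; simp
    have h2 : P.sum = i + (P.erase i).sum := by
      rw [(List.perm_cons_erase hi).sum_eq]; simp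
    omega

theorem descend (t bs : List Char) (k : Nat) : ∀ (n : Nat) (P : List Nat), P.sum ≤ n →
    P ∈ pvCombs k (List.range t.length) → ∀ x ∈ pvProd (chA t bs P),
    ∃ Q ∈ pvCombs k (List.range t.length), (List.Lex (· < ·) Q P ∨ Q = P) ∧
      x ∈ pvProd (chB t bs Q) := by
  intro n
  induction n with
  | zero =>
    intro P hsum hP x hx
    by_cases hcond : ∀ i, i < t.length → P.contains i = true → gFM t bs P ≤ i →
        x.getD i ' ' ≠ t.getD i ' '
    · exact ⟨P, hP, Or.inr rfl, (mem_chB_iff t bs P x).mpr ⟨hx, hcond⟩⟩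
    · push_neg at hcond
      rcases hcond with ⟨i, hiL, hci, hgi, hm⟩
      rcases exists_earlier t bs k P x hP hx i (by simpa using hci) hgi hm with
        ⟨Q, _, _, _, hsumQ⟩
      omega
  | succ n ihn =>
    intro P hsum hP x hx
    by_cases hcond : ∀ i, i < t.length → P.contains i = true → gFM t bs P ≤ i →
        x.getD i ' ' ≠ t.getD i ' '
    · exact ⟨P, hP, Or.inr rfl, (mem_chB_iff t bs P x).mpr ⟨hx, hcond⟩⟩
    · push_neg at hcond
      rcases hcond with ⟨i, hiL, hci, hgi, hm⟩
      rcases exists_earlier t bs k P x hP hx i (by simpa using hci) hgi hm with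
        ⟨Q, hQmem, hQlex, hQx, hsumQ⟩
      rcases ihn Q (by omega) hQmem x hQx with ⟨Q', hQ'mem, hQ'lex, hQ'x⟩
      refine ⟨Q', hQ'mem, Or.inl ?_, hQ'x⟩
      rcases hQ'lex with h | rfl
      · exact lt_trans (show Q' < Q from h) (show Q < P from hQlex)
      · exact hQlex

theorem ofList_inj : Function.Injective String.ofList := by
  intro a b h
  have := congrArg String.toList h
  simpa using this

-- membership hypothesis for a block of processed combinations
theorem hmem_pre (t bs : List Char) (k : Nat) (pre rest : List (List Nat)) (P : List Nat)
    (hall : pvCombs k (List.range t.length) = pre ++ P :: rest) :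
    ∀ x ∈ pvProd (chA t bs P),
      (x ∈ pre.flatMap (fun Q => pvProd (chB t bs Q)) ↔ allQ (psOf t bs P) x = false) := by
  intro x hx
  have hPmem : P ∈ pvCombs k (List.range t.length) := by rw [hall]; simp
  have hPsub := ((mem_pvCombs k (List.range t.length) P).mp hPmem).2
  have hPlenk := ((mem_pvCombs k (List.range t.length) P).mp hPmem).1
  have hPlt : ∀ i ∈ P, i < t.length := fun i hi => List.mem_range.mp (hPsub.subset hi)
  have hPs : P.Pairwise (· < ·) := List.Pairwise.sublist hPsub List.pairwise_lt_range
  have hpair := pvCombs_pairwise_lex k (List.range t.length) List.pairwise_lt_range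
  rcases (mem_chA_iff t bs P x).mp hx with ⟨hxlen, hxon, hxoff⟩
  constructor
  · intro hmem
    rcases List.mem_flatMap.mp hmem with ⟨Q, hQpre, hQx⟩
    have hQmem : Q ∈ pvCombs k (List.range t.length) := by rw [hall]; simp [hQpre]
    have hQsub := ((mem_pvCombs k (List.range t.length) Q).mp hQmem).2
    have hQlenk := ((mem_pvCombs k (List.range t.length) Q).mp hQmem).1
    have hQlt : ∀ i ∈ Q, i < t.length := fun i hi => List.mem_range.mp (hQsub.subset hi)
    have hQs : Q.Pairwise (· < ·) := List.Pairwise.sublist hQsub List.pairwise_lt_range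
    rcases (mem_chB_iff t bs Q x).mp hQx with ⟨hQxA, _⟩
    rcases (mem_chA_iff t bs Q x).mp hQxA with ⟨_, hQon, hQoff⟩
    have hlex : List.Lex (· < ·) Q P := by
      rw [hall] at hpair
      exact (List.pairwise_append.mp hpair).2.2 Q hQpre P (by simp)
    rcases Bool.eq_false_or_eq_true (allQ (psOf t bs P) x) with htrue | hf
    swap
    · exact hf
    exfalso
    have hcond := (allQ_psOf_iff t bs P x hx hPlt).mp htrue
    refine no_earlier t bs x hlex [] hQs hPs (by omega) (by simp) (by simp) ?_ ?_ ?_ ?_ ?_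
    · intro i hiL _ hiP
      exact hxoff i hiL (by simpa using hiP)
    · intro i hiL _ hiQ
      exact hQoff i hiL (by simpa using hiQ)
    · intro i hiP
      exact ⟨hPlt i hiP, hxon i (hPlt i hiP) (by simpa using hiP)⟩
    · intro i hiQ
      exact ⟨hQlt i hiQ, hQon i (hQlt i hiQ) (by simpa using hiQ)⟩
    · intro i hiP hmatch j hj _ hjP htj
      have hig : ¬ (gFM t bs P ≤ i) := fun hgi =>
        hcond i (hPlt i hiP) (by simpa using hiP) hgi hmatch
      have hjL : j < t.length := by have := hPlt i hiP; omega
      have : gFM t bs P ≤ j := pvFirst_min _ t.length j hjL (by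
        simp only [Bool.and_eq_true, Bool.not_eq_true']
        exact ⟨by simpa using hjP, (PySem.Set.contains_iff _ _).mpr ((PySem.List.mem_dedup _ _).mpr htj)⟩)
      omega
  · intro hfalse
    have hncond : ¬ (∀ i, i < t.length → P.contains i = true → gFM t bs P ≤ i →
        x.getD i ' ' ≠ t.getD i ' ') := by
      intro hcond
      rw [(allQ_psOf_iff t bs P x hx hPlt).mpr hcond] at hfalse
      simp at hfalse
    push_neg at hncond
    rcases hncond with ⟨i, hiL, hci, hgi, hm⟩
    rcases exists_earlier t bs k P x hPmem hx i (by simpa using hci) hgi hm with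
      ⟨Q, hQmem, hQlex, hQx, _⟩
    rcases descend t bs k Q.sum Q (le_refl _) hQmem x hQx with ⟨Q', hQ'mem, hQ'lex, hQ'B⟩
    have hQ'lexP : List.Lex (· < ·) Q' P := by
      rcases hQ'lex with h | rfl
      · exact lt_trans (show Q' < Q from h) (show Q < P from hQlex)
      · exact hQlex
    have hQ'pre : Q' ∈ pre := by
      rw [hall] at hQ'mem hpair
      rcases List.mem_append.mp hQ'mem with h | h
      · exact h
      · exfalso
        rcases List.mem_cons.mp h with rfl | h
        · exact absurd (show Q' < Q' from hQ'lexP) (lt_irrefl Q')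
        · have := (List.pairwise_cons.mp (List.pairwise_append.mp hpair).2.1).1 Q' h
          exact absurd (lt_trans (show Q' < P from hQ'lexP) (show P < Q' from this))
            (lt_irrefl Q')
    exact List.mem_flatMap.mpr ⟨Q', hQ'pre, hQ'B⟩

theorem foldA_eq (t bs : List Char) (k : Nat) : ∀ (rest pre : List (List Nat)),
    pvCombs k (List.range t.length) = pre ++ rest →
    rest.foldl (fun S P => (pvProd (chA t bs P)).foldl PySem.Set.add S)
        (pre.flatMap (fun Q => pvProd (chB t bs Q)))
      = (pre ++ rest).flatMap (fun Q => pvProd (chB t bs Q)) := by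
  intro rest
  induction rest with
  | nil => intro pre _; simp
  | cons P rest ih =>
    intro pre hall
    rw [List.foldl_cons]
    have hPmem : P ∈ pvCombs k (List.range t.length) := by rw [hall]; simp
    have hPsub := ((mem_pvCombs k (List.range t.length) P).mp hPmem).2
    have hPlt : ∀ i ∈ P, i < t.length := fun i hi => List.mem_range.mp (hPsub.subset hi)
    have hstep : (pvProd (chA t bs P)).foldl PySem.Set.add
        (pre.flatMap (fun Q => pvProd (chB t bs Q)))
        = (pre ++ [P]).flatMap (fun Q => pvProd (chB t bs Q)) := by
      rw [foldl_add_eq_news]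
      have hnews : pvNews (pre.flatMap (fun Q => pvProd (chB t bs Q)))
          (pvProd (chA t bs P)) = pvProd (chB t bs P) := by
        have h1 : pvProd (chA t bs P) = pvProd ((psOf t bs P).map Prod.fst) := by
          rw [psOf_fst]
        rw [h1, news_prod (psOf t bs P) _ ?_, chOf_psOf t bs P hPlt]
        intro y hy
        rw [← h1] at hy
        exact hmem_pre t bs k pre rest P hall y hy
      rw [hnews]
      simp
    rw [hstep, ih (pre ++ [P]) (by rw [hall]; simp)]
    simp

theorem pvProd_chB_nodup (t bs : List Char) (P : List Nat) : (pvProd (chB t bs P)).Nodup := by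
  apply pvProd_nodup
  intro l hl
  rcases List.mem_map.mp hl with ⟨i, _, rfl⟩
  by_cases hci : i ∈ P
  · rw [if_neg (by simp [hci])]
    by_cases hg : i < gFM t bs P
    · rw [if_pos hg]; exact PySem.List.nodup_dedup bs
    · rw [if_neg hg]; exact (PySem.List.nodup_dedup bs).filter _
  · rw [if_pos (by simp [hci])]; simp

theorem foldB_eq (t bs : List Char) (k : Nat) : ∀ (rest pre : List (List Nat)),
    pvCombs k (List.range t.length) = pre ++ rest →
    rest.foldl (fun S P => (pvProd (chB t bs P)).foldl PySem.Set.add S)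
        (pre.flatMap (fun Q => pvProd (chB t bs Q)))
      = (pre ++ rest).flatMap (fun Q => pvProd (chB t bs Q)) := by
  intro rest
  induction rest with
  | nil => intro pre _; simp
  | cons P rest ih =>
    intro pre hall
    rw [List.foldl_cons]
    have hPmem : P ∈ pvCombs k (List.range t.length) := by rw [hall]; simp
    have hPsub := ((mem_pvCombs k (List.range t.length) P).mp hPmem).2
    have hPlt : ∀ i ∈ P, i < t.length := fun i hi => List.mem_range.mp (hPsub.subset hi)
    have hstep : (pvProd (chB t bs P)).foldl PySem.Set.add
        (pre.flatMap (fun Q => pvProd (chB t bs Q)))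
        = (pre ++ [P]).flatMap (fun Q => pvProd (chB t bs Q)) := by
      rw [foldl_add_eq_news, pvNews_eq_self _ _ (pvProd_chB_nodup t bs P) ?_]
      · simp
      · intro y hy
        rcases (mem_chB_iff t bs P y).mp hy with ⟨hyA, hcond⟩
        intro hmem
        have := (hmem_pre t bs k pre rest P hall y hyA).mp hmem
        rw [(allQ_psOf_iff t bs P y hyA hPlt).mpr hcond] at this
        simp at this
    rw [hstep, ih (pre ++ [P]) (by rw [hall]; simp)]
    simp

-- ---- transport from char-list level to String level ----
theorem foldl_add_mk (l : List (List Char)) : ∀ (S : List (List Char)),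
    l.foldl (fun s p => PySem.Set.add s (String.ofList p)) (S.map String.ofList)
      = (l.foldl PySem.Set.add S).map String.ofList := by
  induction l with
  | nil => intro S; rfl
  | cons x l ih =>
    intro S
    rw [List.foldl_cons, List.foldl_cons]
    have hadd : PySem.Set.add (S.map String.ofList) (String.ofList x)
        = (PySem.Set.add S x).map String.ofList := by
      by_cases hx : x ∈ S
      · rw [PySem.Set.add_of_mem (List.mem_map_of_mem hx), PySem.Set.add_of_mem hx]
      · rw [PySem.Set.add_of_not_mem (fun hc => ?_), PySem.Set.add_of_not_mem hx, List.map_append]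
        · rfl
        · rcases List.mem_map.mp hc with ⟨y, hy, hxy⟩
          exact hx (ofList_inj hxy ▸ hy)
    rw [hadd, ih]

theorem foldl_outer_mk (stream : List Nat → List (List Char)) :
    ∀ (cs : List (List Nat)) (S : List (List Char)),
    cs.foldl (fun s P => (stream P).foldl (fun s p => PySem.Set.add s (String.ofList p)) s)
        (S.map String.ofList)
      = (cs.foldl (fun s P => (stream P).foldl PySem.Set.add s) S).map String.ofList := by
  intro cs
  induction cs with
  | nil => intro S; rfl
  | cons P cs ih =>
    intro S
    rw [List.foldl_cons, List.foldl_cons, foldl_add_mk, ih]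

theorem pvFoldl_congr {β : Type} (l : List (List Nat)) (f g : β → List Nat → β) (init : β)
    (h : ∀ acc x, x ∈ l → f acc x = g acc x) : l.foldl f init = l.foldl g init := by
  induction l generalizing init with
  | nil => rfl
  | cons x l ih =>
    rw [List.foldl_cons, List.foldl_cons, h init x (by simp)]
    exact ih _ (fun acc y hy => h acc y (by simp [hy]))

theorem portA_eq (t bs : List Char) (k : Nat) :
    (pvCombs k (List.range t.length)).foldl (fun S locs =>
       (pvProd (locs.foldl (fun sl loc => sl.set loc bs) (t.map fun c => [c]))).foldl
         (fun s p => PySem.Set.add s (String.ofList p)) S) []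
    = ((pvCombs k (List.range t.length)).flatMap (fun P => pvProd (chB t bs P))).map
        String.ofList := by
  have hcongr := pvFoldl_congr (pvCombs k (List.range t.length))
    (fun S locs =>
      (pvProd (locs.foldl (fun sl loc => sl.set loc bs) (t.map fun c => [c]))).foldl
        (fun s p => PySem.Set.add s (String.ofList p)) S)
    (fun S locs =>
      (pvProd (chA t bs locs)).foldl (fun s p => PySem.Set.add s (String.ofList p)) S)
    ([] : List String)
    (fun acc locs hl => by
      dsimp only
      rw [seq_locs_eq_chA t bs locs (fun i hi =>
        List.mem_range.mp ((((mem_pvCombs k (List.range t.length) locs).mp hl).2).subset hi))])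
  rw [hcongr]
  rw [show ([] : List String) = (([] : List (List Char)).map String.ofList) from rfl]
  rw [foldl_outer_mk (fun locs => pvProd (chA t bs locs))]
  rw [show ([] : List (List Char)) =
    (([] : List (List Nat)).flatMap (fun Q => pvProd (chB t bs Q))) from rfl]
  rw [foldA_eq t bs k (pvCombs k (List.range t.length)) [] (by simp)]
  simp

theorem portB_eq (t bs : List Char) (k : Nat) :
    (pvCombs k (List.range t.length)).foldl (fun S locs =>
       (pvProd ((List.range t.length).map (fun i =>
          if !locs.contains i then [t.getD i ' ']
          else if i < pvFirst (fun j => !locs.contains j &&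
              PySem.Set.contains (PySem.Set.ofList bs) (t.getD j ' '))
              (List.range t.length) t.length
          then PySem.Set.ofList bs
          else (PySem.Set.ofList bs).filter (fun b => b ≠ t.getD i ' ')))).foldl
         (fun s p => PySem.Set.add s (String.ofList p)) S) []
    = ((pvCombs k (List.range t.length)).flatMap (fun P => pvProd (chB t bs P))).map
        String.ofList := by
  show (pvCombs k (List.range t.length)).foldl (fun S locs =>
       (pvProd (chB t bs locs)).foldl (fun s p => PySem.Set.add s (String.ofList p)) S) [] = _
  rw [show ([] : List String) = (([] : List (List Char)).map String.ofList) from rfl]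
  rw [foldl_outer_mk (fun locs => pvProd (chB t bs locs))]
  rw [show ([] : List (List Char)) =
    (([] : List (List Nat)).flatMap (fun Q => pvProd (chB t bs Q))) from rfl]
  rw [foldB_eq t bs k (pvCombs k (List.range t.length)) [] (by simp)]
  simp

-- ===== VERDICT (by name: the statement is the Claim_ definition above) =====
theorem findall_mismatch_spec : Claim_equal_findall_mismatch := by
  intro seq n bases _ hpre
  have hn : 0 ≤ n := hpre
  unfold Spec_findall_mismatch findall_mismatch findall_mismatch_alt
  dsimp only
  have hk : (if n > (seq.toList.length : Int) then (seq.toList.length : Int) else n)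
      = min n (seq.toList.length : Int) := by
    split <;> omega
  rw [hk]
  exact (portA_eq seq.toList bases.toList (min n (seq.toList.length : Int)).toNat).trans
    (portB_eq seq.toList bases.toList (min n (seq.toList.length : Int)).toNat).symm
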